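-- pv_equiv track=rewrite | github.com/openstack-charmers/devstack-utils-nova-lxd | files-devstack-gate/calc-tempest-regex.py | ensure_sane_set
-- ===== SOURCE A (Python) =====
-- def ensure_sane_set(test_cases):
--     """Ensure that there are no 'unit_tests' if there is already a bare
--     Class in the list.  This is in case a tearDown method was the issue and
--     thus the whole class needs testing to see if the failure is still there.
--
--     filter out any blank lines
--
--     returns a sane list of test_cases
--     """
--     test_cases_copy = test_cases[:]
--     while True:
--         for i, outer_tokens in enumerate(test_cases_copy):
--             restart = False
--             for j, inner_tokens in enumerate(test_cases_copy):
--                 if i == j: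
--                     continue
--                 if (len(outer_tokens) == len(inner_tokens) - 1 and
--                         outer_tokens == inner_tokens[:-1]):
--                     del test_cases_copy[j]
--                     restart = True
--                     break
--             if restart:
--                 break
--         else:
--             return test_cases_copy
-- ===== SOURCE B (Python) =====
-- def ensure_sane_set(test_cases):
--     """Ensure that there are no 'unit_tests' if there is already a bare
--     Class in the list.  This is in case a tearDown method was the issue and
--     thus the whole class needs testing to see if the failure is still there.
--
--     filter out any blank lines
--
--     returns a sane list of test_cases
--     """
--     # One left-to-right pass collects the 'killer' values: an element acts as
--     # a killer iff, at its own turn, its immediate prefix is not already a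
--     # killer.  An element survives iff its immediate prefix is not a killer.
--     killers = set()
--     for tokens in test_cases:
--         if not tokens or tuple(tokens[:-1]) not in killers:
--             killers.add(tuple(tokens))
--     return [tokens for tokens in test_cases
--             if not tokens or tuple(tokens[:-1]) not in killers]
-- ===== Notes on version B (the rewrite author's own statement) =====
-- stated objective: alternative
-- what changed: A repeatedly rescans the whole list with two nested loops and restarts after every deletion; B makes one left-to-right pass collecting the set of 'killer' values (elements whose immediate prefix is not already a killer at their turn) and then filters out every element whose immediate prefix is a killer.
import Mathlib
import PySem

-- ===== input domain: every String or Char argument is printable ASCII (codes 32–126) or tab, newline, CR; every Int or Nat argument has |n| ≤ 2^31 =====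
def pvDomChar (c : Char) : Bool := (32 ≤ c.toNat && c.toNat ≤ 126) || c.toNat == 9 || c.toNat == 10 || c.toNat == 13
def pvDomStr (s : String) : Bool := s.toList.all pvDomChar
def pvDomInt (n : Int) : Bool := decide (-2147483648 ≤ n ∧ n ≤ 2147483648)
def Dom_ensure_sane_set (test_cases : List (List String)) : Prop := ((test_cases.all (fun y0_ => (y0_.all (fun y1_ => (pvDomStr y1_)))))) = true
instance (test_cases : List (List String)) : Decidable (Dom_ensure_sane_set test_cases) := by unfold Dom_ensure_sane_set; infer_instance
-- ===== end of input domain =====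

-- B replaces A's restart-on-delete nested rescans by one pass building a set of 'killer' values plus one filter pass (a different algorithm, not measured faster on a timing run's inputs; A does not mutate its argument — it copies it first — so return values are the whole behaviour).

-- ===== PORT A =====
-- inner 'for j, inner_tokens in enumerate(test_cases_copy)' loop: first j ≠ i whose tokens
-- extend outer_tokens by one ('inner_tokens[:-1]' on a list is exactly List.dropLast)
def pvScanJ (i : Nat) (outer : List String) (j : Nat) (rest : List (List String)) : Option Nat :=
  match rest with
  | [] => none
  | inner :: rest' =>
    if j = i then pvScanJ i outer (j + 1) rest'
    else if (outer.length : Int) = (inner.length : Int) - 1 ∧ outer = inner.dropLast then some j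
    else pvScanJ i outer (j + 1) rest'

-- outer 'for i, outer_tokens in enumerate(test_cases_copy)' loop: first (i, j) pair found
def pvScanI (tcs : List (List String)) (i : Nat) (rest : List (List String)) : Option (Nat × Nat) :=
  match rest with
  | [] => none
  | outer :: rest' =>
    match pvScanJ i outer 0 tcs with
    | some j => some (i, j)
    | none => pvScanI tcs (i + 1) rest'

theorem pvScanJ_some_lt (i : Nat) (outer : List String) :
    ∀ (rest : List (List String)) (j0 k : Nat), pvScanJ i outer j0 rest = some k → k < j0 + rest.length := by
  intro rest
  induction rest with
  | nil => intro j0 k h; simp [pvScanJ] at h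
  | cons inner rest' ih =>
    intro j0 k h
    simp only [pvScanJ] at h
    split at h
    · have := ih (j0 + 1) k h; simp at *; omega
    · split at h
      · simp at h; simp; omega
      · have := ih (j0 + 1) k h; simp at *; omega

theorem pvScanI_snd_lt (tcs : List (List String)) :
    ∀ (rest : List (List String)) (i0 i j : Nat), pvScanI tcs i0 rest = some (i, j) → j < tcs.length := by
  intro rest
  induction rest with
  | nil => intro i0 i j h; simp [pvScanI] at h
  | cons outer rest' ih =>
    intro i0 i j h
    simp only [pvScanI] at h
    split at h
    · rename_i k hk
      have := pvScanJ_some_lt i0 outer tcs 0 k hk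
      simp at h
      omega
    · exact ih (i0 + 1) i j h

-- 'while True' with restart-on-delete ('del test_cases_copy[j]'), return when a full scan finds no pair
def pvLoop (tcs : List (List String)) : List (List String) :=
  match h : pvScanI tcs 0 tcs with
  | some (_, j) => pvLoop (tcs.eraseIdx j)
  | none => tcs
termination_by tcs.length
decreasing_by
  have hj := pvScanI_snd_lt tcs tcs 0 _ _ h
  simp [List.length_eraseIdx, hj]
  omega

def ensure_sane_set (test_cases : List (List String)) : List (List String) :=
  -- test_cases_copy = test_cases[:]
  pvLoop test_cases

-- ===== PORT B =====
-- loop body of B's first pass: record tokens as a killer if its immediate prefix is not one yet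
def pvStep (ks : PySem.Set (List String)) (t : List String) : PySem.Set (List String) :=
  if t.isEmpty || !(PySem.Set.contains ks t.dropLast) then PySem.Set.add ks t else ks

-- condition of B's final list comprehension
def pvVerdict (ks : PySem.Set (List String)) (t : List String) : Bool :=
  t.isEmpty || !(PySem.Set.contains ks t.dropLast)

def ensure_sane_set_alt (test_cases : List (List String)) : List (List String) :=
  let killers := test_cases.foldl pvStep PySem.Set.empty
  test_cases.filter (fun t => pvVerdict killers t)

-- ===== PRECONDITION & SPEC =====
def Spec_ensure_sane_set (test_cases : List (List String)) (out : List (List String)) : Prop := out = ensure_sane_set_alt test_cases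
instance (test_cases : List (List String)) (out : List (List String)) : Decidable (Spec_ensure_sane_set test_cases out) := by unfold Spec_ensure_sane_set; infer_instance

-- ===== CLAIM (what is proved, stated in full; the proofs are below) =====
def Claim_equal_ensure_sane_set : Prop := ∀ (test_cases : List (List String)), Dom_ensure_sane_set test_cases → Spec_ensure_sane_set test_cases (ensure_sane_set test_cases)

-- ===== LEMMAS AND PROOFS =====

-- 'inner_tokens is a one-token extension of outer_tokens', in the shape both programs test
def pvChildP (o t : List String) : Prop := t ≠ [] ∧ t.dropLast = o

theorem pvChildP_iff (o t : List String) :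
    ((o.length : Int) = (t.length : Int) - 1 ∧ o = t.dropLast) ↔ pvChildP o t := by
  unfold pvChildP
  constructor
  · rintro ⟨h1, h2⟩
    cases t with
    | nil => simp at h2; subst h2; simp at h1
    | cons a t' => exact ⟨by simp, h2.symm⟩
  · rintro ⟨h1, h2⟩
    have ht : 1 ≤ t.length := by
      cases t with
      | nil => exact absurd rfl h1
      | cons a t' => exact Nat.succ_le_succ (Nat.zero_le _)
    subst h2
    constructor
    · push_cast [List.length_dropLast]; omega
    · rfl

-- the killer set as B computes it
def pvK (l : List (List String)) : PySem.Set (List String) := l.foldl pvStep PySem.Set.empty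

theorem pvAlt_eq (l : List (List String)) :
    ensure_sane_set_alt l = l.filter (fun t => pvVerdict (pvK l) t) := rfl

theorem mem_pvStep {w : List String} {ks : PySem.Set (List String)} {t : List String} :
    w ∈ pvStep ks t → w ∈ ks ∨ w = t := by
  unfold pvStep; split
  · intro h; rwa [PySem.Set.mem_add] at h
  · exact Or.inl

theorem pvStep_mono {w : List String} {ks : PySem.Set (List String)} (t : List String) :
    w ∈ ks → w ∈ pvStep ks t := by
  intro h; unfold pvStep; split
  · rw [PySem.Set.mem_add]; exact Or.inl h
  · exact h

theorem pvFoldl_mono {w : List String} (l : List (List String)) :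
    ∀ ks : PySem.Set (List String), w ∈ ks → w ∈ l.foldl pvStep ks := by
  induction l with
  | nil => intro ks h; simpa using h
  | cons t l' ih => intro ks h; exact ih _ (pvStep_mono t h)

theorem mem_pvFoldl_elim {w : List String} (l : List (List String)) :
    ∀ ks : PySem.Set (List String), w ∈ l.foldl pvStep ks → w ∈ ks ∨ w ∈ l := by
  induction l with
  | nil => intro ks h; exact Or.inl h
  | cons t l' ih =>
    intro ks h
    rcases ih _ h with h' | h'
    · rcases mem_pvStep h' with h'' | h''
      · exact Or.inl h''
      · exact Or.inr (by simp [h''])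
    · exact Or.inr (by simp [h'])

-- folding over a suffix none of whose elements queries v preserves agreement-off-v
theorem pvEqv_foldl (v : List String) (l : List (List String)) (hl : ∀ t ∈ l, ¬ pvChildP v t) :
    ∀ ks1 ks2 : PySem.Set (List String), (∀ w, w ≠ v → (w ∈ ks1 ↔ w ∈ ks2)) →
      ∀ w, w ≠ v → (w ∈ l.foldl pvStep ks1 ↔ w ∈ l.foldl pvStep ks2) := by
  induction l with
  | nil => intro ks1 ks2 h w hw; simpa using h w hw
  | cons t l' ih =>
    intro ks1 ks2 h w hw
    simp only [List.foldl_cons]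
    refine ih (fun t' ht' => hl t' (by simp [ht'])) _ _ ?_ w hw
    intro w' hw'
    have hcond : (t.isEmpty || !(PySem.Set.contains ks1 t.dropLast))
        = (t.isEmpty || !(PySem.Set.contains ks2 t.dropLast)) := by
      by_cases ht : t = []
      · simp [ht]
      · have hq : t.dropLast ≠ v := by
          intro hdl
          exact hl t (by simp) ⟨ht, hdl⟩
        have hmem := h t.dropLast hq
        have : PySem.Set.contains ks1 t.dropLast = PySem.Set.contains ks2 t.dropLast := by
          cases h1 : PySem.Set.contains ks1 t.dropLast <;> cases h2 : PySem.Set.contains ks2 t.dropLast <;> try rfl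
          · have hm1 : t.dropLast ∈ ks1 := hmem.mpr ((PySem.Set.contains_iff ks2 t.dropLast).mp h2)
            have hc1 := (PySem.Set.contains_iff ks1 t.dropLast).mpr hm1
            rw [h1] at hc1; exact absurd hc1 (by decide)
          · have hm2 : t.dropLast ∈ ks2 := hmem.mp ((PySem.Set.contains_iff ks1 t.dropLast).mp h1)
            have hc2 := (PySem.Set.contains_iff ks2 t.dropLast).mpr hm2
            rw [h2] at hc2; exact absurd hc2 (by decide)
        rw [this]
    unfold pvStep
    rw [hcond]
    split
    · rw [PySem.Set.mem_add, PySem.Set.mem_add]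
      exact or_congr (h w' hw') Iff.rfl
    · exact h w' hw'


theorem pvContains_eq_of_iff {x : List String} {s t : PySem.Set (List String)}
    (h : x ∈ s ↔ x ∈ t) : PySem.Set.contains s x = PySem.Set.contains t x := by
  cases h1 : PySem.Set.contains s x <;> cases h2 : PySem.Set.contains t x <;> try rfl
  · have hc := (PySem.Set.contains_iff s x).mpr (h.mpr ((PySem.Set.contains_iff t x).mp h2))
    rw [h1] at hc; exact absurd hc (by decide)
  · have hc := (PySem.Set.contains_iff t x).mpr (h.mp ((PySem.Set.contains_iff s x).mp h1))
    rw [h2] at hc; exact absurd hc (by decide)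

theorem pvNotEmpty_isEmpty {t : List String} (h : t ≠ []) : t.isEmpty = false := by
  cases t with
  | nil => exact absurd rfl h
  | cons a b => rfl

theorem pvMem_take_pos {x : List String} {l : List (List String)} {j : Nat} (h : x ∈ l.take j) :
    ∃ k, ∃ (hk : k < l.length), k < j ∧ l[k] = x := by
  obtain ⟨k, hk, hval⟩ := List.getElem_of_mem h
  have hlen := hk
  simp only [List.length_take] at hlen
  have hkl : k < l.length := by omega
  exact ⟨k, hkl, by omega, by rw [← hval]; exact (List.getElem_take).symm ▸ rfl⟩

theorem pvMem_drop_pos {x : List String} {l : List (List String)} {j : Nat} (h : x ∈ l.drop j) :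
    ∃ k, ∃ (hk : k < l.length), j ≤ k ∧ l[k] = x := by
  obtain ⟨k, hk, hval⟩ := List.getElem_of_mem h
  have hlen := hk
  simp only [List.length_drop] at hlen
  refine ⟨j + k, by omega, by omega, ?_⟩
  rw [← hval, List.getElem_drop]

-- an element none of whose predecessors is its immediate prefix enters the killer set
theorem pvKiller_mem (l : List (List String)) (i : Nat) (hi : i < l.length)
    (hpar : ∀ i' (h' : i' < i), ¬ pvChildP l[i'] l[i]) : l[i] ∈ pvK l := by
  have hd : l = l.take i ++ (l[i] :: l.drop (i + 1)) := by
    rw [← List.drop_eq_getElem_cons hi, List.take_append_drop]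
  have hK : pvK l = (l.drop (i + 1)).foldl pvStep
      (pvStep ((l.take i).foldl pvStep PySem.Set.empty) l[i]) := by
    conv_lhs => rw [pvK, hd]
    rw [List.foldl_append, List.foldl_cons]
  rw [hK]
  apply pvFoldl_mono
  unfold pvStep
  split
  · rw [PySem.Set.mem_add]; exact Or.inr rfl
  · rename_i hcond
    exfalso
    rw [Bool.or_eq_true, Bool.not_eq_true'] at hcond
    push Not at hcond
    obtain ⟨hne, hcont⟩ := hcond
    have hne' : l[i] ≠ [] := by
      intro h0; rw [h0] at hne; exact hne rfl
    have hmem : l[i].dropLast ∈ (l.take i).foldl pvStep PySem.Set.empty :=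
      (PySem.Set.contains_iff _ _).mp (Bool.not_eq_false _ ▸ hcont)
    rcases mem_pvFoldl_elim _ _ hmem with hc | hc
    · simp [PySem.Set.empty] at hc
    · obtain ⟨k, hk, hlt, hval⟩ := pvMem_take_pos hc
      exact hpar k hlt ⟨hne', hval.symm⟩

-- deleting A's chosen element leaves B's result unchanged
theorem pvErase_preserves (l : List (List String)) (i j : Nat) (hi : i < l.length) (hj : j < l.length)
    (hij : j ≠ i) (hchild : pvChildP l[i] l[j])
    (hMinI : ∀ i' (h' : i' < i), ∀ k (hk : k < l.length), k ≠ i' → ¬ pvChildP l[i'] l[k]) :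
    ensure_sane_set_alt (l.eraseIdx j) = ensure_sane_set_alt l := by
  have hiK : l[i] ∈ pvK l := pvKiller_mem l i hi (fun i' h' => hMinI i' h' i hi (by omega))
  have hjveto : pvVerdict (pvK l) l[j] = false := by
    unfold pvVerdict
    rw [pvNotEmpty_isEmpty hchild.1, (PySem.Set.contains_iff _ _).mpr (hchild.2 ▸ hiK)]
    rfl
  have hd : l = l.take j ++ (l[j] :: l.drop (j + 1)) := by
    rw [← List.drop_eq_getElem_cons hj, List.take_append_drop]
  have hKl : pvK l = (l.drop (j + 1)).foldl pvStep
      (pvStep ((l.take j).foldl pvStep PySem.Set.empty) l[j]) := by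
    conv_lhs => rw [pvK, hd]
    rw [List.foldl_append, List.foldl_cons]
  have hKe : pvK (l.eraseIdx j) = (l.drop (j + 1)).foldl pvStep
      ((l.take j).foldl pvStep PySem.Set.empty) := by
    rw [pvK, List.eraseIdx_eq_take_drop_succ, List.foldl_append]
  rcases Nat.lt_or_ge i j with hij' | hij'
  · -- i < j : the step at l[j] is a no-op on the killer set
    have hiKpre : l[i] ∈ (l.take j).foldl pvStep PySem.Set.empty := by
      have hlen : i < (l.take j).length := by simp only [List.length_take]; omega
      have hpar : ∀ i' (h' : i' < i), ¬ pvChildP (l.take j)[i'] (l.take j)[i] := by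
        intro i' h' hc
        rw [List.getElem_take, List.getElem_take] at hc
        exact hMinI i' h' i hi (by omega) hc
      have := pvKiller_mem (l.take j) i hlen hpar
      rw [pvK] at this
      rwa [List.getElem_take] at this
    have hstep : pvStep ((l.take j).foldl pvStep PySem.Set.empty) l[j]
        = (l.take j).foldl pvStep PySem.Set.empty := by
      unfold pvStep
      rw [pvNotEmpty_isEmpty hchild.1, (PySem.Set.contains_iff _ _).mpr (hchild.2 ▸ hiKpre)]
      rfl
    have hKeq : pvK (l.eraseIdx j) = pvK l := by rw [hKl, hKe, hstep]
    rw [pvAlt_eq, pvAlt_eq, hKeq]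
    set KS := pvK l with hKS
    conv_rhs => rw [hd]
    rw [List.eraseIdx_eq_take_drop_succ, List.filter_append, List.filter_append, List.filter_cons,
      hjveto]
    simp
  · -- j < i : l[j] has no children anywhere, so dropping it only loses itself
    have hji : j < i := by omega
    have hnochild : ∀ k (hk : k < l.length), k ≠ j → ¬ pvChildP l[j] l[k] :=
      fun k hk hkj => hMinI j hji k hk hkj
    have hEqv : ∀ w, w ≠ l[j] → (w ∈ pvK l ↔ w ∈ pvK (l.eraseIdx j)) := by
      intro w hw
      rw [hKl, hKe]
      refine pvEqv_foldl l[j] (l.drop (j + 1)) ?_ _ _ ?_ w hw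
      · intro t ht hc
        obtain ⟨k, hk, hkge, hval⟩ := pvMem_drop_pos ht
        exact hnochild k hk (by omega) (hval ▸ hc)
      · intro w' hw'
        constructor
        · intro h
          rcases mem_pvStep h with h' | h'
          · exact h'
          · exact absurd h' hw'
        · exact pvStep_mono _
    have hagree : ∀ t ∈ l, t.dropLast ≠ l[j] →
        pvVerdict (pvK l) t = pvVerdict (pvK (l.eraseIdx j)) t := by
      intro t _ hdl
      unfold pvVerdict
      rw [pvContains_eq_of_iff (hEqv t.dropLast hdl)]
    have hsafe : ∀ t k (hk : k < l.length), k ≠ j → l[k] = t →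
        pvVerdict (pvK (l.eraseIdx j)) t = pvVerdict (pvK l) t := by
      intro t k hk hkj hval
      by_cases ht : t = []
      · subst ht; rfl
      · have hdl : t.dropLast ≠ l[j] := by
          intro h
          exact hnochild k hk hkj ⟨hval ▸ ht, hval ▸ h⟩
        exact (hagree t (by rw [← hval]; exact List.getElem_mem hk) hdl).symm
    rw [pvAlt_eq, pvAlt_eq]
    set KS2 := pvK (l.eraseIdx j) with hKS2
    set KS1 := pvK l with hKS1
    conv_rhs => rw [hd]
    rw [List.eraseIdx_eq_take_drop_succ, List.filter_append, List.filter_append, List.filter_cons,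
      hjveto]
    have htake : (l.take j).filter (fun t => pvVerdict KS2 t)
        = (l.take j).filter (fun t => pvVerdict KS1 t) := by
      apply List.filter_congr
      intro x hx
      obtain ⟨k, hk, hklt, hval⟩ := pvMem_take_pos hx
      exact hsafe x k hk (by omega) hval
    have hdrop : (l.drop (j + 1)).filter (fun t => pvVerdict KS2 t)
        = (l.drop (j + 1)).filter (fun t => pvVerdict KS1 t) := by
      apply List.filter_congr
      intro x hx
      obtain ⟨k, hk, hkge, hval⟩ := pvMem_drop_pos hx
      exact hsafe x k hk (by omega) hval
    rw [htake, hdrop]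
    simp

-- when no pair remains, B's filter keeps everything
theorem pvNoPair_fix (l : List (List String))
    (hNone : ∀ i' (hi' : i' < l.length), ∀ k (hk : k < l.length), k ≠ i' → ¬ pvChildP l[i'] l[k]) :
    ensure_sane_set_alt l = l := by
  rw [pvAlt_eq]
  apply List.filter_eq_self.mpr
  intro x hx
  obtain ⟨k, hk, hval⟩ := List.getElem_of_mem hx
  unfold pvVerdict
  by_cases hxe : x = []
  · subst hxe; rfl
  · rw [pvNotEmpty_isEmpty hxe]
    cases hcont : PySem.Set.contains (pvK l) x.dropLast with
    | false => rfl
    | true =>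
      exfalso
      have hmem : x.dropLast ∈ pvK l := (PySem.Set.contains_iff _ _).mp hcont
      rcases mem_pvFoldl_elim _ _ hmem with hc | hc
      · simp [PySem.Set.empty] at hc
      · obtain ⟨i', hi', hval'⟩ := List.getElem_of_mem hc
        have hik : i' ≠ k := by
          intro he
          have hlen : x.dropLast.length = x.length - 1 := List.length_dropLast
          have hx1 : 1 ≤ x.length := by
            cases x with
            | nil => exact absurd rfl hxe
            | cons a b => exact Nat.succ_le_succ (Nat.zero_le _)
          have : l[i'] = x := by subst he; exact hval
          rw [this] at hval'
          have := congrArg List.length hval'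
          rw [hlen] at this
          omega
        refine hNone i' hi' k hk (fun he => hik he.symm) ?_
        refine ⟨by rw [hval]; exact hxe, ?_⟩
        rw [hval, hval']

theorem pvScanJ_none_spec (i : Nat) (outer : List String) :
    ∀ (rest : List (List String)) (j0 : Nat), pvScanJ i outer j0 rest = none →
      ∀ m (hm : m < rest.length), j0 + m ≠ i → ¬ pvChildP outer rest[m] := by
  intro rest
  induction rest with
  | nil => intro j0 _ m hm; simp at hm
  | cons inner rest' ih =>
    intro j0 h m hm hne
    simp only [pvScanJ] at h
    split at h
    · rename_i hji
      match m with
      | 0 => exact absurd (by omega) hne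
      | m' + 1 =>
        have := ih (j0 + 1) h m' (by simpa using Nat.lt_of_succ_lt_succ hm) (by omega)
        simpa using this
    · split at h
      · exact absurd h (by simp)
      · rename_i hji hcond
        match m with
        | 0 =>
          intro hc
          exact hcond ((pvChildP_iff outer inner).mpr (by simpa using hc))
        | m' + 1 =>
          have := ih (j0 + 1) h m' (by simpa using Nat.lt_of_succ_lt_succ hm) (by omega)
          simpa using this

theorem pvScanJ_some_spec (i : Nat) (outer : List String) :
    ∀ (rest : List (List String)) (j0 k : Nat), pvScanJ i outer j0 rest = some k →
      j0 ≤ k ∧ ∃ (hm : k - j0 < rest.length), k ≠ i ∧ pvChildP outer rest[k - j0] ∧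
        ∀ m (hm' : m < k - j0), j0 + m ≠ i → ¬ pvChildP outer rest[m] := by
  intro rest
  induction rest with
  | nil => intro j0 k h; simp [pvScanJ] at h
  | cons inner rest' ih =>
    intro j0 k h
    simp only [pvScanJ] at h
    split at h
    · rename_i hji
      obtain ⟨hle, hm, hki, hch, hmin⟩ := ih (j0 + 1) k h
      have hs : k - j0 = (k - (j0 + 1)) + 1 := by omega
      refine ⟨by omega, by simp only [List.length_cons]; omega, hki, by simpa [hs] using hch, ?_⟩
      intro m hm' hne
      match m with
      | 0 => exact absurd (by omega) hne
      | m' + 1 =>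
        have := hmin m' (by omega) (by omega)
        simpa using this
    · split at h
      · rename_i hji hcond
        have hk : k = j0 := by simpa using h.symm
        subst hk
        refine ⟨Nat.le_refl _, by simp, fun he => hji (by omega), ?_, ?_⟩
        · simpa using (pvChildP_iff outer inner).mp hcond
        · intro m hm'; omega
      · rename_i hji hcond
        obtain ⟨hle, hm, hki, hch, hmin⟩ := ih (j0 + 1) k h
        have hs : k - j0 = (k - (j0 + 1)) + 1 := by omega
        refine ⟨by omega, by simp only [List.length_cons]; omega, hki, by simpa [hs] using hch, ?_⟩
        intro m hm' hne
        match m with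
        | 0 =>
          intro hc
          exact hcond ((pvChildP_iff outer inner).mpr (by simpa using hc))
        | m' + 1 =>
          have := hmin m' (by omega) (by omega)
          simpa using this

theorem pvScanI_none_spec (tcs : List (List String)) :
    ∀ (rest : List (List String)) (i0 : Nat), pvScanI tcs i0 rest = none →
      ∀ m (hm : m < rest.length), pvScanJ (i0 + m) rest[m] 0 tcs = none := by
  intro rest
  induction rest with
  | nil => intro i0 _ m hm; simp at hm
  | cons outer rest' ih =>
    intro i0 h m hm
    simp only [pvScanI] at h
    split at h
    · exact absurd h (by simp)
    · rename_i hnone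
      match m with
      | 0 => simpa using hnone
      | m' + 1 =>
        have := ih (i0 + 1) h m' (by simpa using Nat.lt_of_succ_lt_succ hm)
        simpa [Nat.add_assoc, Nat.add_comm 1 m'] using this

theorem pvScanI_some_spec (tcs : List (List String)) :
    ∀ (rest : List (List String)) (i0 i j : Nat), pvScanI tcs i0 rest = some (i, j) →
      ∃ m, ∃ (hm : m < rest.length), i = i0 + m ∧ pvScanJ (i0 + m) rest[m] 0 tcs = some j ∧
        ∀ m' (hm' : m' < m), pvScanJ (i0 + m') rest[m'] 0 tcs = none := by
  intro rest
  induction rest with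
  | nil => intro i0 i j h; simp [pvScanI] at h
  | cons outer rest' ih =>
    intro i0 i j h
    simp only [pvScanI] at h
    split at h
    · rename_i k hk
      simp at h
      obtain ⟨rfl, rfl⟩ := h
      exact ⟨0, by simp, by omega, by simpa using hk, fun m' hm' => by omega⟩
    · rename_i hnone
      obtain ⟨m, hm, hi, hsome, hmin⟩ := ih (i0 + 1) i j h
      refine ⟨m + 1, by simpa using Nat.succ_lt_succ hm, by omega, ?_, ?_⟩
      · simpa [Nat.add_assoc, Nat.add_comm 1 m] using hsome
      · intro m' hm'
        match m' with
        | 0 => simpa using hnone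
        | m'' + 1 =>
          have := hmin m'' (by omega)
          simpa [Nat.add_assoc, Nat.add_comm 1 m''] using this

theorem pvLoop_eq (l : List (List String)) : pvLoop l = ensure_sane_set_alt l := by
  induction l using pvLoop.induct with
  | case1 tcs i j h ih =>
    rw [pvLoop]
    split
    · rename_i i' j' heq
      rw [h] at heq
      cases heq
      rw [ih]
      obtain ⟨m, hm, him, hsome, hminI⟩ := pvScanI_some_spec tcs tcs 0 i j h
      have him' : i = m := by omega
      subst him'
      rw [Nat.zero_add] at hsome
      obtain ⟨-, hlt, hne, hch, -⟩ := pvScanJ_some_spec i tcs[i] tcs 0 j hsome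
      simp only [Nat.sub_zero] at hlt hch
      refine pvErase_preserves tcs i j hm hlt hne hch ?_
      intro i' h' k hk hki'
      have hnone := hminI i' (by omega)
      have := pvScanJ_none_spec (0 + i') tcs[i'] tcs 0 (by simpa using hnone) k hk (by omega)
      simpa using this
    · rename_i heq
      rw [h] at heq
      cases heq
  | case2 tcs h =>
    rw [pvLoop]
    split
    · rename_i i' j' heq
      rw [h] at heq
      cases heq
    · refine (pvNoPair_fix tcs ?_).symm
      intro i' hi' k hk hki'
      have hnone := pvScanI_none_spec tcs tcs 0 h i' hi'
      have := pvScanJ_none_spec (0 + i') tcs[i'] tcs 0 (by simpa using hnone) k hk (by omega)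
      simpa using this

-- ===== VERDICT (by name: the statement is the Claim_ definition above) =====
theorem ensure_sane_set_spec : Claim_equal_ensure_sane_set := by
  intro tcs _
  unfold Spec_ensure_sane_set ensure_sane_set
  exact pvLoop_eq tcs
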